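-- pv_equiv track=rewrite | github.com/Samuel-E-Lidbrink/Symbol_math | symbol_math.py | _replace_helper
-- ===== SOURCE A (Python) =====
-- COMMON_OPERATORS = ["sinh", "cosh", "tanh", "asinh", "acosh", "atanh", "sin", "cos", "tan", "asin", "atan", "acos",
--                     "log", "exp"]
--
-- def _replace_helper(expression, old_var, new_var, index):
--     """Help function for replace_var."""
--     if index == len(COMMON_OPERATORS):
--         return expression.replace(old_var, new_var)
--     else:
--         sub_list = expression.split(COMMON_OPERATORS[index])
--         for place in range(0, len(sub_list)):
--             sub_list[place] = _replace_helper(sub_list[place], old_var, new_var, index + 1)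
--         return COMMON_OPERATORS[index].join(sub_list)
-- ===== SOURCE B (Python) =====
-- COMMON_OPERATORS = ["sinh", "cosh", "tanh", "asinh", "acosh", "atanh", "sin", "cos", "tan", "asin", "atan", "acos",
--                     "log", "exp"]
--
-- def _replace_helper(expression, old_var, new_var, index):
--     """Iterative re-implementation: one pass per operator over a flat list of
--     fragments tagged as ordinary text (False) or protected operator separator (True)."""
--     frags = [(expression, False)]
--     for op in COMMON_OPERATORS[index:]:
--         new_frags = []
--         for text, protected in frags:
--             if protected:
--                 new_frags.append((text, True))
--             else:
--                 parts = text.split(op)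
--                 new_frags.append((parts[0], False))
--                 for part in parts[1:]:
--                     new_frags.append((op, True))
--                     new_frags.append((part, False))
--         frags = new_frags
--     return "".join(text if protected else text.replace(old_var, new_var)
--                    for text, protected in frags)
-- ===== Notes on version B (the rewrite author's own statement) =====
-- stated objective: alternative
-- what changed: A's index-recursion with per-level split/rejoin is replaced by a single iterative loop over the operator list that maintains a flat list of fragments tagged as text or protected operator separator, with one final join.
-- outside the precondition, e.g. on _replace_helper('sin', 'sin', 's', -1): A returns 'sin', B returns 's'
import Mathlib
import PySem

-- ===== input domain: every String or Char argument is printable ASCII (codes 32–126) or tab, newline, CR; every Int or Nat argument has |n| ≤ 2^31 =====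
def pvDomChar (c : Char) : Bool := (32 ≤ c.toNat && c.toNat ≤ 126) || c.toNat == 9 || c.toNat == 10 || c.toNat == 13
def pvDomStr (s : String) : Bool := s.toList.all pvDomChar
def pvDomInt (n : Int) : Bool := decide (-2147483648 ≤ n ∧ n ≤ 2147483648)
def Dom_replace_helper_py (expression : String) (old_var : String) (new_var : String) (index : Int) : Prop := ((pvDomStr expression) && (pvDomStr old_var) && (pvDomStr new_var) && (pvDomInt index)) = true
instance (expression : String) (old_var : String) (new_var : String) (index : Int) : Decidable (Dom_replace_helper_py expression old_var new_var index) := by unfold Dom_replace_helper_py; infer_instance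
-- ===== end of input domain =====

-- B replaces A's recursion over the operator index by one iterative pass keeping a flat
-- list of fragments tagged text / protected-operator-separator (objective: alternative decomposition).


def COMMON_OPERATORS : List String :=
  ["sinh", "cosh", "tanh", "asinh", "acosh", "atanh", "sin", "cos", "tan", "asin", "atan", "acos", "log", "exp"]

-- ===== PORT A =====
-- literal transliteration of A's recursion; the `none` branch of pyGet? is Python's
-- IndexError (excluded by Pre_), where the port just returns the expression.
def replace_helper_py (expression : String) (old_var : String) (new_var : String) (index : Int) : String :=
  if index = (COMMON_OPERATORS.length : Int) then
    PySem.Str.replace expression old_var new_var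
  else
    match h : PySem.List.pyGet? COMMON_OPERATORS index with
    | none => expression
    | some op =>
      let sub_list := (PySem.Str.split? expression op).getD []
      PySem.Str.join op (sub_list.map (fun s => replace_helper_py s old_var new_var (index + 1)))
termination_by ((COMMON_OPERATORS.length : Int) - index).toNat
decreasing_by
  have hin : PySem.Raise.InRange COMMON_OPERATORS.length index := by
    by_contra hc
    rw [(PySem.List.pyGet?_eq_none_iff _ _).mpr hc] at h
    exact absurd h (by simp)
  have hlt : index < (COMMON_OPERATORS.length : Int) := hin.2
  omega

-- ===== PORT B =====
-- one fragment for one operator: the body of Source B's inner `for text, protected in frags` loop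
def altSplitFrag (op : String) (acc : List (String × Bool)) (tp : String × Bool) : List (String × Bool) :=
  if tp.2 then acc ++ [(tp.1, true)]
  else
    let parts := (PySem.Str.split? tp.1 op).getD []
    (parts.tail).foldl (fun acc part => acc ++ [(op, true), (part, false)])
      (acc ++ [(parts.headD "", false)])

-- Source B's `new_frags` pass for one operator
def altStep (frags : List (String × Bool)) (op : String) : List (String × Bool) :=
  frags.foldl (altSplitFrag op) []

def replace_helper_py_alt (expression : String) (old_var : String) (new_var : String) (index : Int) : String :=
  let ops := PySem.List.slice COMMON_OPERATORS (some index) none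
  let frags := ops.foldl altStep [(expression, false)]
  PySem.Str.join "" (frags.map (fun tp => if tp.2 then tp.1 else PySem.Str.replace tp.1 old_var new_var))

-- ===== PRECONDITION & SPEC =====
-- Pre_ excludes index > 14 and index < -14, where A raises IndexError, and
-- -14 ≤ index ≤ -1, where A still returns but its value is an accident of Python's
-- negative-index wraparound (the recursion walks ops[index..-1] and then the whole list
-- again) while B's slice ops[index:] reads the same argument as the last |index|
-- operators — a corner of this internal helper that no caller specifies.
def Pre_replace_helper_py (expression : String) (old_var : String) (new_var : String) (index : Int) : Prop :=
  0 ≤ index ∧ index ≤ 14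
instance (expression : String) (old_var : String) (new_var : String) (index : Int) : Decidable (Pre_replace_helper_py expression old_var new_var index) := by unfold Pre_replace_helper_py; infer_instance

def pvWitness_replace_helper_py : String × String × String × Int := ("sin(x) + x", "x", "y2", 0)

def Spec_replace_helper_py (expression : String) (old_var : String) (new_var : String) (index : Int) (out : String) : Prop := out = replace_helper_py_alt expression old_var new_var index
instance (expression : String) (old_var : String) (new_var : String) (index : Int) (out : String) : Decidable (Spec_replace_helper_py expression old_var new_var index out) := by unfold Spec_replace_helper_py; infer_instance

-- ===== CLAIM (what is proved, stated in full; the proofs are below) =====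
def Claim_equal_replace_helper_py : Prop := ∀ (expression : String) (old_var : String) (new_var : String) (index : Int), Dom_replace_helper_py expression old_var new_var index → Pre_replace_helper_py expression old_var new_var index → Spec_replace_helper_py expression old_var new_var index (replace_helper_py expression old_var new_var index)

-- ===== LEMMAS AND PROOFS =====

theorem join_nil_cons (p : List Char) (l : List (List Char)) :
    PySem.Chars.join [] (p :: l) = p ++ PySem.Chars.join [] l := by
  cases l with
  | nil => simp [PySem.Chars.join_singleton, PySem.Chars.join_nil]
  | cons q r => rw [PySem.Chars.join_cons_cons]; simp

theorem sjoin_nil_cons (p : String) (l : List String) :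
    PySem.Str.join "" (p :: l) = p ++ PySem.Str.join "" l := by
  apply String.toList_inj.mp
  simp [PySem.Str.toList_join, join_nil_cons]

theorem sjoin_nil_append (xs ys : List String) :
    PySem.Str.join "" (xs ++ ys) = PySem.Str.join "" xs ++ PySem.Str.join "" ys := by
  induction xs with
  | nil =>
    apply String.toList_inj.mp
    simp [PySem.Str.toList_join, PySem.Chars.join_nil]
  | cons p xs ih => simp [sjoin_nil_cons, ih, String.append_assoc]

theorem sjoin_singleton (sep p : String) : PySem.Str.join sep [p] = p := by
  apply String.toList_inj.mp
  simp [PySem.Str.toList_join, PySem.Chars.join_singleton]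

theorem sjoin_cons_cons (sep p q : String) (l : List String) :
    PySem.Str.join sep (p :: q :: l) = p ++ sep ++ PySem.Str.join sep (q :: l) := by
  apply String.toList_inj.mp
  simp [PySem.Str.toList_join, PySem.Chars.join_cons_cons]

theorem splitOn_go_ne_nil (sep : List Char) (fuel : Nat) (l cur : List Char)
    (acc : List (List Char)) : PySem.Chars.splitOn.go sep fuel l cur acc ≠ [] := by
  induction fuel generalizing l cur acc with
  | zero => simp [PySem.Chars.splitOn.go]
  | succ f ih =>
    cases l with
    | nil => simp [PySem.Chars.splitOn.go]
    | cons c rest =>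
      rw [PySem.Chars.splitOn.go]
      split
      · exact ih _ _ _
      · exact ih _ _ _

theorem split?_getD_ne_nil (t op : String) (h : op ≠ "") :
    (PySem.Str.split? t op).getD [] ≠ [] := by
  have hop : op.toList.isEmpty = false := by
    cases hh : op.toList.isEmpty
    · rfl
    · exact absurd (String.toList_inj.mp (by simpa using hh)) h
  simp [PySem.Str.split?, PySem.Chars.split?, hop, PySem.Chars.splitOn]
  exact splitOn_go_ne_nil _ _ _ _ _

-- A's recursion, restated over the list of remaining operators (proof-side helper).
def recA (o n : String) : String → List String → String
  | e, [] => PySem.Str.replace e o n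
  | e, op :: rest =>
    PySem.Str.join op (((PySem.Str.split? e op).getD []).map (fun s => recA o n s rest))

-- what altSplitFrag appends for one fragment
def expand (op : String) (tp : String × Bool) : List (String × Bool) :=
  if tp.2 then [(tp.1, true)]
  else
    let parts := (PySem.Str.split? tp.1 op).getD []
    (parts.headD "", false) :: parts.tail.flatMap (fun q => [(op, true), (q, false)])

-- the value a fragment contributes once the remaining operators L have been applied
def gfun (o n : String) (L : List String) (tp : String × Bool) : String :=
  if tp.2 then tp.1 else recA o n tp.1 L

theorem altSplitFrag_eq (op : String) (acc : List (String × Bool)) (tp : String × Bool) :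
    altSplitFrag op acc tp = acc ++ expand op tp := by
  unfold altSplitFrag expand
  split
  · rfl
  · rw [PySem.List.foldl_append_eq_flatMap]
    simp

theorem altStep_eq (frags : List (String × Bool)) (op : String) :
    altStep frags op = frags.flatMap (expand op) := by
  unfold altStep
  have : altSplitFrag op = fun acc tp => acc ++ expand op tp :=
    funext fun a => funext fun t => altSplitFrag_eq op a t
  rw [this, PySem.List.foldl_append_eq_flatMap]
  simp

theorem chain (o n op : String) (rest : List String) (tl : List String) (x : String) :
    PySem.Str.join "" (recA o n x rest ::
        (tl.flatMap (fun q => [(op, true), (q, false)])).map (gfun o n rest))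
    = PySem.Str.join op ((x :: tl).map (fun s => recA o n s rest)) := by
  induction tl generalizing x with
  | nil => simp [sjoin_singleton]
  | cons q r ih =>
    have h1 : gfun o n rest (op, true) = op := by simp [gfun]
    have h2 : gfun o n rest (q, false) = recA o n q rest := by simp [gfun]
    simp only [List.flatMap_cons, List.map_append, List.map_cons, List.map_nil, List.cons_append,
      List.nil_append, h1, h2]
    rw [sjoin_nil_cons, sjoin_nil_cons, ih q, sjoin_cons_cons]
    simp [String.append_assoc]

theorem frag_expand (o n op : String) (rest : List String) (hop : op ≠ "") (tp : String × Bool) :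
    PySem.Str.join "" ((expand op tp).map (gfun o n rest)) = gfun o n (op :: rest) tp := by
  unfold expand
  by_cases h2 : tp.2
  · simp [h2, gfun, sjoin_singleton]
  · simp only [h2, Bool.false_eq_true, ite_false]
    have hne := split?_getD_ne_nil tp.1 op hop
    obtain ⟨p, tl, hp⟩ := List.exists_cons_of_ne_nil hne
    simp only [hp, List.headD_cons, List.tail_cons, List.map_cons]
    have hg : gfun o n rest (p, false) = recA o n p rest := by simp [gfun]
    rw [hg, chain]
    simp only [gfun, h2, Bool.false_eq_true, ite_false]
    rw [recA, hp]

theorem core (o n : String) (L : List String) (hL : ∀ op ∈ L, op ≠ "")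
    (frags : List (String × Bool)) :
    PySem.Str.join "" ((L.foldl altStep frags).map
        (fun tp => if tp.2 then tp.1 else PySem.Str.replace tp.1 o n))
    = PySem.Str.join "" (frags.map (gfun o n L)) := by
  induction L generalizing frags with
  | nil =>
    simp only [List.foldl_nil]
    refine congrArg _ (List.map_congr_left fun tp _ => ?_)
    simp [gfun, recA]
  | cons op rest ih =>
    rw [List.foldl_cons, ih (fun b hb => hL b (List.mem_cons_of_mem _ hb))]
    rw [altStep_eq]
    induction frags with
    | nil => simp
    | cons tp fr ihf =>
      rw [List.flatMap_cons, List.map_append, sjoin_nil_append, ihf]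
      rw [List.map_cons, sjoin_nil_cons]
      rw [frag_expand o n op rest (hL op List.mem_cons_self) tp]

theorem A_eq_recA (o n : String) (d : Nat) : ∀ (k : Nat) (e : String), k + d = 14 →
    replace_helper_py e o n (k : Int) = recA o n e (COMMON_OPERATORS.drop k) := by
  induction d with
  | zero =>
    intro k e hk
    have hk' : k = 14 := by omega
    subst hk'
    rw [replace_helper_py]
    simp [COMMON_OPERATORS, recA]
  | succ d ih =>
    intro k e hk
    have hk14 : k < 14 := by omega
    have hlen : COMMON_OPERATORS.length = 14 := by decide
    rw [replace_helper_py]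
    rw [if_neg (by rw [hlen]; omega)]
    have hget : PySem.List.pyGet? COMMON_OPERATORS (k : Int) = some (COMMON_OPERATORS[k]'(by omega)) := by
      rw [PySem.List.pyGet?_natCast]
      exact List.getElem?_eq_getElem (by omega)
    split
    · next heq => rw [hget] at heq; exact absurd heq (by simp)
    · next op heq =>
      rw [hget] at heq
      injection heq with heq
      subst heq
      rw [List.drop_eq_getElem_cons (by omega), recA]
      dsimp only
      congr 1
      apply List.map_congr_left
      intro s _
      have h1 : ((k : Int) + 1) = ((k + 1 : Nat) : Int) := by push_cast; ring
      rw [h1, ih (k + 1) s (by omega)]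

theorem ports_agree (e o n : String) (i : Int) (h0 : 0 ≤ i) (h14 : i ≤ 14) :
    replace_helper_py e o n i = replace_helper_py_alt e o n i := by
  have hi : i = ((i.toNat : Nat) : Int) := (Int.toNat_of_nonneg h0).symm
  have hall : ∀ op ∈ COMMON_OPERATORS, op ≠ "" := by decide
  rw [hi]
  unfold replace_helper_py_alt
  rw [PySem.List.slice_from _ (by omega)]
  simp only [Int.toNat_natCast]
  rw [core o n _ (fun op hop => hall op (List.mem_of_mem_drop hop)) [(e, false)]]
  rw [A_eq_recA o n (14 - i.toNat) i.toNat e (by omega)]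
  simp only [List.map_cons, List.map_nil]
  rw [sjoin_singleton]
  simp [gfun]

-- ===== VERDICT (by name: the statement is the Claim_ definition above) =====
theorem replace_helper_py_spec : Claim_equal_replace_helper_py := by
  intro e o n i _ hpre
  unfold Spec_replace_helper_py
  exact ports_agree e o n i hpre.1 hpre.2
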